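-- pv_equiv track=rewrite | github.com/woo427/Algorithm | 프로그래머스/1/42840. 모의고사/모의고사.py | solution
-- ===== SOURCE A (Python) =====
-- def solution(answers):
--     student1 = [1,2,3,4,5]
--     student2 = [2,1,2,3,2,4,2,5]
--     student3 = [3,3,1,1,2,2,4,4,5,5]
--     scores = [0,0,0]
--     answer = []
--
--     for i in range(len(answers)):
--         if answers[i] == student1[i%5]:
--             scores[0] += 1
--         if answers[i] == student2[i%8]:
--             scores[1] += 1
--         if answers[i] == student3[i%10]:
--             scores[2] += 1
--
--     for index, score in enumerate(scores):
--         if score == max(scores):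
--             answer.append(index+1)
--     return answer
-- ===== SOURCE B (Python) =====
-- def solution(answers):
--     # Histogram approach: every pattern is periodic with period dividing 40,
--     # so a match at index i depends only on (i % 40, answers[i]).  Build a
--     # frequency table of those pairs once, then score each student with 40
--     # table lookups instead of comparing against the patterns element-wise.
--     PERIOD = 40
--     patterns = [[1, 2, 3, 4, 5],
--                 [2, 1, 2, 3, 2, 4, 2, 5],
--                 [3, 3, 1, 1, 2, 2, 4, 4, 5, 5]]
--     cnt = {}
--     for i, a in enumerate(answers):
--         key = (i % PERIOD, a)
--         cnt[key] = cnt.get(key, 0) + 1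
--     scores = [sum(cnt.get((r, p[r % len(p)]), 0) for r in range(PERIOD))
--               for p in patterns]
--     best = max(scores)
--     return [i + 1 for i, sc in enumerate(scores) if sc == best]
-- ===== Notes on version B (the rewrite author's own statement) =====
-- stated objective: alternative
-- what changed: A compares each answer element-wise against the three cyclic patterns in one interleaved scan; B instead builds a frequency table of (index mod 40, answer) pairs in one pass (40 = lcm of the pattern periods, so a match depends only on that pair) and scores each student with 40 table lookups, then picks the winners from the score list.
import Mathlib
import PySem

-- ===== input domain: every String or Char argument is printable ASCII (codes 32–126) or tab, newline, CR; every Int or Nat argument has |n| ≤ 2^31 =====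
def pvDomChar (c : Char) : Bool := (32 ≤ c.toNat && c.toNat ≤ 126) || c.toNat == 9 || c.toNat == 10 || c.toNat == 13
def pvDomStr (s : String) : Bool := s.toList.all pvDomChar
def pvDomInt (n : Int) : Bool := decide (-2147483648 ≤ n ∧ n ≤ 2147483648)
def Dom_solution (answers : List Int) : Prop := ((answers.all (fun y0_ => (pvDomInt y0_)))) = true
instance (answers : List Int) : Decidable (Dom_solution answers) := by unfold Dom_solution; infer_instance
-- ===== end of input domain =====

-- B replaces A's element-wise comparison against the three cyclic patterns by a frequency
-- table of (index mod 40, answer) pairs built once, each student then scored by 40 table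
-- lookups; objective: alternative (same asymptotic cost, different algorithm).

-- ===== PORT A =====
-- A's loop body as a helper (one step of the single interleaved scan over the indices).
-- answers[i] is always in range inside the loop, so `.getD 0` never fires; exact.
def aStep (answers : List Int) (sc : Int × Int × Int) (i : Int) : Int × Int × Int :=
  let student1 : List Int := [1, 2, 3, 4, 5]
  let student2 : List Int := [2, 1, 2, 3, 2, 4, 2, 5]
  let student3 : List Int := [3, 3, 1, 1, 2, 2, 4, 4, 5, 5]
  let a := (PySem.List.pyGet? answers i).getD 0
  let s0 := if a = (PySem.List.pyGet? student1 (PySem.Int.mod i 5)).getD 0 then sc.1 + 1 else sc.1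
  let s1 := if a = (PySem.List.pyGet? student2 (PySem.Int.mod i 8)).getD 0 then sc.2.1 + 1 else sc.2.1
  let s2 := if a = (PySem.List.pyGet? student3 (PySem.Int.mod i 10)).getD 0 then sc.2.2 + 1 else sc.2.2
  (s0, s1, s2)

def solution (answers : List Int) : List Int :=
  let scores :=
    (PySem.List.pyRange 0 (answers.length : Int) 1).foldl (aStep answers) (0, 0, 0)
  let scoreList : List Int := [scores.1, scores.2.1, scores.2.2]
  (PySem.List.enumerate scoreList).foldl
    (fun ans p => if p.2 = (PySem.List.max? scoreList (fun y => y)).getD 0 then ans ++ [p.1 + 1] else ans) []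

-- ===== PORT B =====
-- `cnt[key] = cnt.get(key, 0) + 1` is Dict.modify key 0 (· + 1); exact.
def histo (answers : List Int) : PySem.Dict (Int × Int) Int :=
  (PySem.List.enumerate answers).foldl
    (fun d p => d.modify (PySem.Int.mod p.1 40, p.2) 0 (· + 1)) PySem.Dict.empty

-- `sum(cnt.get((r, p[r % len(p)]), 0) for r in range(40))`; r % len(p) < len(p) ≤ 40,
-- so the pattern index is always in range and `.getD 0` never fires; exact.
def patScore (cnt : PySem.Dict (Int × Int) Int) (p : List Int) : Int :=
  ((PySem.List.pyRange 0 40 1).map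
    (fun r => cnt.getD (r, (PySem.List.pyGet? p (PySem.Int.mod r (p.length : Int))).getD 0) 0)).sum

def solution_alt (answers : List Int) : List Int :=
  let patterns : List (List Int) :=
    [[1, 2, 3, 4, 5], [2, 1, 2, 3, 2, 4, 2, 5], [3, 3, 1, 1, 2, 2, 4, 4, 5, 5]]
  let cnt := histo answers
  let scores := patterns.map (patScore cnt)
  let best := (PySem.List.max? scores (fun y => y)).getD 0
  (PySem.List.enumerate scores).filterMap (fun q => if q.2 = best then some (q.1 + 1) else none)

-- ===== PRECONDITION & SPEC =====
def Spec_solution (answers : List Int) (out : List Int) : Prop := out = solution_alt answers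
instance (answers : List Int) (out : List Int) : Decidable (Spec_solution answers out) := by unfold Spec_solution; infer_instance

-- ===== CLAIM (what is proved, stated in full; the proofs are below) =====
def Claim_equal_solution : Prop := ∀ (answers : List Int), Dom_solution answers → Spec_solution answers (solution answers)

-- ===== LEMMAS AND PROOFS =====

-- proof-side common form: number of indices i with answers[i] = p[i mod len p]
def mScore (p : List Int) (answers : List Int) : Int :=
  (PySem.List.enumerate answers).foldl
    (fun acc q =>
      if q.2 = (PySem.List.pyGet? p (PySem.Int.mod q.1 (p.length : Int))).getD 0
      then acc + 1 else acc) 0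

theorem foldl_congr_on {α β : Type} (l : List α) (f g : β → α → β) (b : β)
    (h : ∀ a ∈ l, ∀ x, f x a = g x a) : l.foldl f b = l.foldl g b := by
  induction l generalizing b with
  | nil => rfl
  | cons y ys ih =>
    simp only [List.foldl_cons]
    rw [h y (by simp)]
    exact ih _ (fun a ha x => h a (by simp [ha]) x)

theorem enumerate_append_singleton {α : Type} (xs : List α) (x : α) (s : Int) :
    PySem.List.enumerate (xs ++ [x]) s = PySem.List.enumerate xs s ++ [((s + xs.length : Int), x)] := by
  rw [PySem.List.enumerate_append]
  simp [PySem.List.enumerate_cons, PySem.List.enumerate_nil]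

theorem mScore_append (p : List Int) (xs : List Int) (x : Int) :
    mScore p (xs ++ [x]) =
      if x = (PySem.List.pyGet? p (PySem.Int.mod (xs.length : Int) (p.length : Int))).getD 0
      then mScore p xs + 1 else mScore p xs := by
  unfold mScore
  rw [enumerate_append_singleton, List.foldl_append]
  simp

theorem aStep_append (xs : List Int) (x : Int) (i : Int) (hi : 0 ≤ i) (hlt : i < (xs.length : Int)) :
    ∀ sc, aStep (xs ++ [x]) sc i = aStep xs sc i := by
  intro sc
  have h : PySem.List.pyGet? (xs ++ [x]) i = PySem.List.pyGet? xs i := by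
    rw [PySem.List.pyGet?_of_nonneg _ hi, PySem.List.pyGet?_of_nonneg _ hi]
    rw [List.getElem?_append_left (by omega)]
  simp only [aStep, h]

theorem aLoop_eq (answers : List Int) :
    (PySem.List.pyRange 0 (answers.length : Int) 1).foldl (aStep answers) (0, 0, 0) =
      (mScore [1, 2, 3, 4, 5] answers,
       mScore [2, 1, 2, 3, 2, 4, 2, 5] answers,
       mScore [3, 3, 1, 1, 2, 2, 4, 4, 5, 5] answers) := by
  induction answers using List.reverseRecOn with
  | nil => simp [mScore, PySem.List.enumerate_nil, PySem.List.pyRange]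
  | append_singleton xs x ih =>
    have hlen : (((xs ++ [x]).length : Int)) = (xs.length : Int) + 1 := by simp
    rw [hlen, PySem.List.pyRange_one_succ_right (by positivity), List.foldl_append]
    have hpre : (PySem.List.pyRange 0 (xs.length : Int) 1).foldl (aStep (xs ++ [x])) (0, 0, 0) =
        (PySem.List.pyRange 0 (xs.length : Int) 1).foldl (aStep xs) (0, 0, 0) := by
      refine foldl_congr_on _ _ _ _ (fun a ha sc => ?_)
      rw [PySem.List.mem_pyRange_one] at ha
      exact aStep_append xs x a ha.1 ha.2 sc
    rw [hpre, ih]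
    have hx : PySem.List.pyGet? (xs ++ [x]) (xs.length : Int) = some x := by
      simp
    simp only [List.foldl_cons, List.foldl_nil, aStep, hx, Option.getD_some]
    rw [mScore_append, mScore_append, mScore_append]
    norm_num

-- the histogram's lookup is a count over the list of (i mod 40, answers[i]) keys
theorem histo_getD (answers : List Int) (k : Int × Int) :
    (histo answers).getD k 0 =
      ((((PySem.List.enumerate answers).map (fun p => (PySem.Int.mod p.1 40, p.2))).count k : Nat) : Int) := by
  have h := PySem.Dict.getD_foldl_modify_add_one
    ((PySem.List.enumerate answers).map (fun p => (PySem.Int.mod p.1 40, p.2)))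
    (PySem.Dict.empty (κ := Int × Int) (ν := Int)) k
  rw [List.foldl_map] at h
  unfold histo
  simpa using h

theorem count_single (a b : Int × Int) :
    ((List.count a [b] : Nat) : Int) = if b = a then 1 else 0 := by
  by_cases h : b = a <;> simp [h]

theorem sum_indicator_zero (f : Int → Int) (x m : Int) (rs : List Int) (hm : m ∉ rs) :
    (rs.map (fun r => if ((m, x) : Int × Int) = (r, f r) then (1 : Int) else 0)).sum = 0 := by
  induction rs with
  | nil => rfl
  | cons r rs ih =>
    have hr : m ≠ r := fun h => hm (h ▸ List.mem_cons_self)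
    have hnot : ¬(((m, x) : Int × Int) = (r, f r)) := by simp [Prod.ext_iff, hr]
    simp only [List.map_cons, List.sum_cons, if_neg hnot, zero_add]
    exact ih (fun h => hm (List.mem_cons_of_mem _ h))

theorem sum_indicator (f : Int → Int) (x m : Int) (rs : List Int)
    (hnd : rs.Nodup) (hm : m ∈ rs) :
    (rs.map (fun r => if ((m, x) : Int × Int) = (r, f r) then (1 : Int) else 0)).sum =
      if x = f m then 1 else 0 := by
  induction rs with
  | nil => cases hm
  | cons r rs ih =>
    rcases List.nodup_cons.mp hnd with ⟨hr, hnd'⟩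
    by_cases hmr : m = r
    · subst hmr
      have hiff : (((m, x) : Int × Int) = (m, f m)) ↔ x = f m := by simp [Prod.ext_iff]
      simp only [List.map_cons, List.sum_cons, sum_indicator_zero f x m rs hr, add_zero,
        if_congr hiff rfl rfl]
    · have hm' : m ∈ rs := by
        rcases List.mem_cons.mp hm with h | h
        · exact absurd h hmr
        · exact h
      have hnot : ¬(((m, x) : Int × Int) = (r, f r)) := by simp [Prod.ext_iff, hmr]
      simp only [List.map_cons, List.sum_cons, if_neg hnot, zero_add]
      exact ih hnd' hm' 

theorem pyRange40_nodup : (PySem.List.pyRange 0 40 1).Nodup := by decide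

-- histogram score = direct match count, for a nonempty pattern whose length divides 40
theorem patScore_eq (p : List Int) (hlen : 0 < p.length) (hdvd : (p.length : Int) ∣ 40)
    (answers : List Int) : patScore (histo answers) p = mScore p answers := by
  induction answers using List.reverseRecOn with
  | nil =>
    unfold patScore
    rw [List.sum_eq_zero]
    · simp [mScore, PySem.List.enumerate_nil]
    · intro y hy
      rcases List.mem_map.mp hy with ⟨r, -, rfl⟩
      rw [histo_getD]
      simp [PySem.List.enumerate_nil]
  | append_singleton xs x ih =>
    set m : Int := PySem.Int.mod (xs.length : Int) 40 with hm
    have hkeys : ((PySem.List.enumerate (xs ++ [x])).map (fun p => (PySem.Int.mod p.1 40, p.2))) =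
        ((PySem.List.enumerate xs).map (fun p => (PySem.Int.mod p.1 40, p.2))) ++ [(m, x)] := by
      rw [enumerate_append_singleton]
      simp [hm]
    unfold patScore
    have hterm : ∀ r : Int,
        (histo (xs ++ [x])).getD (r, (PySem.List.pyGet? p (PySem.Int.mod r (p.length : Int))).getD 0) 0 =
        (histo xs).getD (r, (PySem.List.pyGet? p (PySem.Int.mod r (p.length : Int))).getD 0) 0 +
          (if ((m, x) : Int × Int) = (r, (PySem.List.pyGet? p (PySem.Int.mod r (p.length : Int))).getD 0)
           then (1 : Int) else 0) := by
      intro r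
      rw [histo_getD, histo_getD, hkeys, List.count_append, Nat.cast_add, count_single]
    calc ((PySem.List.pyRange 0 40 1).map
            (fun r => (histo (xs ++ [x])).getD (r, (PySem.List.pyGet? p (PySem.Int.mod r (p.length : Int))).getD 0) 0)).sum
        = ((PySem.List.pyRange 0 40 1).map
            (fun r => (histo xs).getD (r, (PySem.List.pyGet? p (PySem.Int.mod r (p.length : Int))).getD 0) 0 +
              (if ((m, x) : Int × Int) = (r, (PySem.List.pyGet? p (PySem.Int.mod r (p.length : Int))).getD 0)
               then (1 : Int) else 0))).sum := by
          congr 1; exact List.map_congr_left (fun r _ => hterm r)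
      _ = patScore (histo xs) p +
            ((PySem.List.pyRange 0 40 1).map
              (fun r => if ((m, x) : Int × Int) = (r, (PySem.List.pyGet? p (PySem.Int.mod r (p.length : Int))).getD 0)
                then (1 : Int) else 0)).sum := by
          rw [PySem.List.sum_map_add_int]; rfl
      _ = mScore p (xs ++ [x]) := by
          have h40 : (0 : Int) < 40 := by norm_num
          have hmmem : m ∈ PySem.List.pyRange 0 40 1 := by
            rw [PySem.List.mem_pyRange_one]
            exact ⟨PySem.Int.mod_nonneg _ h40, PySem.Int.mod_lt _ h40⟩
          rw [sum_indicator _ x m _ pyRange40_nodup hmmem, ih]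
          have hplen : (0 : Int) < (p.length : Int) := by exact_mod_cast hlen
          have hmod : PySem.Int.mod m (p.length : Int) = PySem.Int.mod (xs.length : Int) (p.length : Int) := by
            rw [hm, PySem.Int.mod_eq_emod_of_pos hplen, PySem.Int.mod_eq_emod_of_pos hplen,
                PySem.Int.mod_eq_emod_of_pos h40]
            exact Int.emod_emod_of_dvd _ hdvd
          rw [mScore_append, hmod]
          split_ifs <;> omega

theorem final_eq (a b c : Int) :
    (PySem.List.enumerate [a, b, c]).foldl
      (fun ans p => if p.2 = (PySem.List.max? [a, b, c] (fun y => y)).getD 0 then ans ++ [p.1 + 1] else ans) [] =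
    (PySem.List.enumerate [a, b, c]).filterMap
      (fun p => if p.2 = (PySem.List.max? [a, b, c] (fun y => y)).getD 0 then some (p.1 + 1) else none) := by
  simp only [PySem.List.enumerate, List.foldl_cons, List.foldl_nil,
    List.filterMap_cons, List.filterMap_nil]
  split_ifs <;> rfl

-- ===== VERDICT (by name: the statement is the Claim_ definition above) =====
theorem solution_spec : Claim_equal_solution := by
  intro answers _
  simp only [Spec_solution, solution, solution_alt]
  rw [aLoop_eq]
  rw [show ([[1, 2, 3, 4, 5], [2, 1, 2, 3, 2, 4, 2, 5], [3, 3, 1, 1, 2, 2, 4, 4, 5, 5]] :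
        List (List Int)).map (patScore (histo answers)) =
      [patScore (histo answers) [1, 2, 3, 4, 5],
       patScore (histo answers) [2, 1, 2, 3, 2, 4, 2, 5],
       patScore (histo answers) [3, 3, 1, 1, 2, 2, 4, 4, 5, 5]] from rfl]
  rw [patScore_eq _ (by norm_num) (by norm_num) answers,
      patScore_eq _ (by norm_num) (by norm_num) answers,
      patScore_eq _ (by norm_num) (by norm_num) answers]
  exact final_eq _ _ _
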